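-- pv_equiv track=rewrite | github.com/ui1211/01_seven_wonders | src/ui/renderer/text_renderer.py | width
-- ===== SOURCE A (Python) =====
-- def width(text: str) -> int:
--     w = 0
--     for c in text:
--         if ord(c) < 128:
--             w += 4
--         else:
--             w += 8
--     return w
-- ===== SOURCE B (Python) =====
-- def width(text: str) -> int:
--     # Weight every char 8, then discount 4 for each ASCII char; the ASCII chars
--     # are obtained at once as the byte string text.encode('ascii', 'ignore')
--     # (each code point < 128 becomes exactly one byte, others are dropped),
--     # so there is no per-character Python loop at all.
--     return 8 * len(text) - 4 * len(text.encode('ascii', 'ignore'))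
-- ===== Notes on version B (the rewrite author's own statement) =====
-- stated objective: faster
-- what changed: Drops the per-character if/else loop entirely: charges 8 per character via len(text) and subtracts 4 per ASCII character, with the ASCII characters extracted in one builtin call (str.encode with the ascii codec, ignoring errors), so the per-character work runs inside the C builtin.
import Mathlib
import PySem

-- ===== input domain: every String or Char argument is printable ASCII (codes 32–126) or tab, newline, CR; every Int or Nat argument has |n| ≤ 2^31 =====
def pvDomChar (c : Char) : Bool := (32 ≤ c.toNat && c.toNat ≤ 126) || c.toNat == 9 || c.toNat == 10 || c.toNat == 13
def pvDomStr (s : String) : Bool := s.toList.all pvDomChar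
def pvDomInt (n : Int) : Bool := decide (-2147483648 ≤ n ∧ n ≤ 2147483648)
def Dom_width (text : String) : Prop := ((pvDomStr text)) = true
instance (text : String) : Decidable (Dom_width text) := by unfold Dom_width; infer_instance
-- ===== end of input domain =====

-- B replaces the per-char if/else loop by 8*len(text) minus 4 per ASCII char, the ASCII chars extracted at once by a builtin encode call (objective: faster by constant factor, measured).


-- ===== PORT A =====
def width (text : String) : Int :=
  text.toList.foldl (fun w c => if c.toNat < 128 then w + 4 else w + 8) 0

-- ===== PORT B =====
-- text.encode('ascii','ignore') keeps exactly the characters with code < 128,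
-- one byte each; its len is therefore the length of that filtered list (exact).
def width_alt (text : String) : Int :=
  8 * (text.toList.length : Int) -
    4 * ((text.toList.filter (fun c => c.toNat < 128)).length : Int)

-- ===== PRECONDITION & SPEC =====
def Spec_width (text : String) (out : Int) : Prop := out = width_alt text
instance (text : String) (out : Int) : Decidable (Spec_width text out) := by unfold Spec_width; infer_instance

-- ===== CLAIM (what is proved, stated in full; the proofs are below) =====
def Claim_equal_width : Prop := ∀ (text : String), Dom_width text → Spec_width text (width text)

-- ===== LEMMAS AND PROOFS =====
theorem width_foldl (l : List Char) (w : Int) :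
    l.foldl (fun w c => if c.toNat < 128 then w + 4 else w + 8) w =
      w + 8 * (l.length : Int) -
        4 * ((l.filter (fun c => c.toNat < 128)).length : Int) := by
  induction l generalizing w with
  | nil => simp
  | cons c l ih =>
    simp only [List.foldl_cons, List.filter_cons, ih]
    by_cases h : c.toNat < 128
    · simp [h]; ring
    · simp [h]; ring

-- ===== VERDICT (by name: the statement is the Claim_ definition above) =====
theorem width_spec : Claim_equal_width := by
  intro text _
  unfold Spec_width width width_alt
  rw [width_foldl]
  ring
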